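-- pv_equiv track=rewrite | github.com/chen21439/layoutlmft | examples/tree/inference_build_tree.py | extract_line_texts
-- ===== SOURCE A (Python) =====
-- def extract_line_texts(tokens, line_ids, line_id_mapping=None):
--     """
--     从 token-level 数据聚合成 line-level 文本
--
--     和训练时保持一致的逻辑：根据 line_ids 将 tokens 分组
--
--     Args:
--         tokens: token 列表 [num_tokens]
--         line_ids: 每个 token 对应的 line_id [num_tokens]（可能是全局编号）
--         line_id_mapping: 全局 line_id 到本地索引的映射 {global_id: local_idx}
--
--     Returns:
--         line_texts: 每个 line 的文本 [num_lines]
--     """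
--     # 找出有效的 line_ids（忽略特殊 token 的 -1）
--     valid_line_ids = [lid for lid in line_ids if lid >= 0]
--     if len(valid_line_ids) == 0:
--         return []
--
--     # 如果提供了映射，使用映射；否则假设从 0 开始连续
--     if line_id_mapping is not None:
--         # 获取唯一的 line_ids 并排序
--         unique_line_ids = sorted(set(valid_line_ids))
--         num_lines = len(unique_line_ids)
--         line_texts = []
--
--         # 按映射后的顺序收集文本
--         for global_lid in unique_line_ids:
--             # 收集这个 line 的所有 tokens
--             line_tokens = []
--             for i in range(len(tokens)):
--                 if i < len(line_ids) and line_ids[i] == global_lid: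
--                     line_tokens.append(tokens[i])
--
--             # 拼接成文本
--             line_text = " ".join(line_tokens) if line_tokens else ""
--             line_texts.append(line_text)
--     else:
--         # 原始逻辑：假设 line_id 从 0 开始连续
--         num_lines = max(valid_line_ids) + 1
--         line_texts = []
--
--         # 按 line_id 分组 tokens
--         for line_id in range(num_lines):
--             # 收集这个 line 的所有 tokens
--             line_tokens = []
--             for i in range(len(tokens)):
--                 if i < len(line_ids) and line_ids[i] == line_id:
--                     line_tokens.append(tokens[i])
--
--             # 拼接成文本
--             line_text = " ".join(line_tokens) if line_tokens else ""
--             line_texts.append(line_text)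
--
--     return line_texts
-- ===== SOURCE B (Python) =====
-- def extract_line_texts(tokens, line_ids, line_id_mapping=None):
--     valid = [lid for lid in line_ids if lid >= 0]
--     if not valid:
--         return []
--     # single pass: group token texts by line_id
--     groups = {}
--     for tok, lid in zip(tokens, line_ids):
--         if lid >= 0:
--             groups.setdefault(lid, []).append(tok)
--     if line_id_mapping is not None:
--         order = sorted(set(valid))
--     else:
--         order = range(max(valid) + 1)
--     return [" ".join(groups.get(lid, [])) for lid in order]
-- ===== Notes on version B (the rewrite author's own statement) =====
-- stated objective: faster
-- what changed: B replaces A's per-line rescans of the whole token list (one full inner scan for every line id) by a single pass that groups tokens into a dict keyed by line_id, then emits the joined texts in the same order (sorted unique ids, or 0..max).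
import Mathlib
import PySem

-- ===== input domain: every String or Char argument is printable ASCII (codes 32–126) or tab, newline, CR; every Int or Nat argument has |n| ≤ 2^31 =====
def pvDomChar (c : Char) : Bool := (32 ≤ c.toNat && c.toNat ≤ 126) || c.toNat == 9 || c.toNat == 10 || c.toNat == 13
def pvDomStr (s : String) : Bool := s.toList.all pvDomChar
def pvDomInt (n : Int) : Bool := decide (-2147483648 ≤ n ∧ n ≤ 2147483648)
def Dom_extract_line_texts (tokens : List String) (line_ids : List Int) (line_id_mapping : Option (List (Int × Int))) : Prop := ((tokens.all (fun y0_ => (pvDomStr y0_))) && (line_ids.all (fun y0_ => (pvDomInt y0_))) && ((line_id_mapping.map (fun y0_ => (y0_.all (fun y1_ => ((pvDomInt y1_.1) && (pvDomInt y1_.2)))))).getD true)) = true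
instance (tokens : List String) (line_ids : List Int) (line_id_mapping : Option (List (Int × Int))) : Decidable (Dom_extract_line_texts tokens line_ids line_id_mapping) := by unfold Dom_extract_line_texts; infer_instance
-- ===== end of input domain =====

-- B replaces A's per-line rescans of the token list by one dict-grouping pass, then emits in the same order (asymptotically faster).

-- ===== PORT A =====
-- A's inner loop: for i in range(len(tokens)): if i < len(line_ids) and line_ids[i] == global_lid: line_tokens.append(tokens[i])
-- (getD's defaults are never used: the guards keep i in range for line_ids, and range(len(tokens)) for tokens)
def pvCollectA (tokens : List String) (line_ids : List Int) (gid : Int) : List String :=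
  (List.range tokens.length).foldl
    (fun acc i => if decide (i < line_ids.length) && (line_ids.getD i 0 == gid) then acc ++ [tokens.getD i ""] else acc) []

def extract_line_texts (tokens : List String) (line_ids : List Int) (line_id_mapping : Option (List (Int × Int))) : List String :=
  let valid := line_ids.filter (fun lid => decide (0 ≤ lid))
  if valid.length = 0 then []
  else
    match line_id_mapping with
    | some _ =>
      let unique := PySem.List.sorted (PySem.Set.ofList valid) (fun x => x) false
      unique.foldl (fun acc gid =>
        let lt := pvCollectA tokens line_ids gid
        acc ++ [if lt = [] then "" else PySem.Str.join " " lt]) []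
    | none =>
      let numLines := ((PySem.List.max? valid (fun x => x)).getD 0) + 1
      (PySem.List.pyRange 0 numLines 1).foldl (fun acc gid =>
        let lt := pvCollectA tokens line_ids gid
        acc ++ [if lt = [] then "" else PySem.Str.join " " lt]) []

-- ===== PORT B =====
-- B's single grouping pass: for tok, lid in zip(tokens, line_ids): if lid >= 0: groups.setdefault(lid, []).append(tok)
def pvGroupsB (tokens : List String) (line_ids : List Int) : PySem.Dict Int (List String) :=
  (tokens.zip line_ids).foldl
    (fun d p => if decide (0 ≤ p.2) then d.insert p.2 (d.getD p.2 [] ++ [p.1]) else d) PySem.Dict.empty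

def extract_line_texts_alt (tokens : List String) (line_ids : List Int) (line_id_mapping : Option (List (Int × Int))) : List String :=
  let valid := line_ids.filter (fun lid => decide (0 ≤ lid))
  if valid = [] then []
  else
    let groups := pvGroupsB tokens line_ids
    let order := match line_id_mapping with
      | some _ => PySem.List.sorted (PySem.Set.ofList valid) (fun x => x) false
      | none => PySem.List.pyRange 0 (((PySem.List.max? valid (fun x => x)).getD 0) + 1) 1
    order.map (fun gid => PySem.Str.join " " (groups.getD gid []))

-- ===== PRECONDITION & SPEC =====
def Spec_extract_line_texts (tokens : List String) (line_ids : List Int) (line_id_mapping : Option (List (Int × Int))) (out : List String) : Prop := out = extract_line_texts_alt tokens line_ids line_id_mapping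
instance (tokens : List String) (line_ids : List Int) (line_id_mapping : Option (List (Int × Int))) (out : List String) : Decidable (Spec_extract_line_texts tokens line_ids line_id_mapping out) := by unfold Spec_extract_line_texts; infer_instance

-- ===== CLAIM (what is proved, stated in full; the proofs are below) =====
def Claim_equal_extract_line_texts : Prop := ∀ (tokens : List String) (line_ids : List Int) (line_id_mapping : Option (List (Int × Int))), Dom_extract_line_texts tokens line_ids line_id_mapping → Spec_extract_line_texts tokens line_ids line_id_mapping (extract_line_texts tokens line_ids line_id_mapping)

-- ===== LEMMAS AND PROOFS =====

-- A's index-guarded scan is the filter of the zipped lists on "line_id == gid"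
theorem pvCollectA_eq_zip_filter (tokens : List String) (line_ids : List Int) (gid : Int) :
    pvCollectA tokens line_ids gid
      = ((tokens.zip line_ids).filter (fun p => p.2 == gid)).map Prod.fst := by
  unfold pvCollectA
  rw [PySem.List.foldl_append_if]
  simp only [List.nil_append]
  induction tokens generalizing line_ids with
  | nil => simp
  | cons t ts ih =>
    cases line_ids with
    | nil => simp
    | cons l ls =>
      simp only [List.length_cons]
      rw [List.range_succ_eq_map]
      have hrest := ih ls
      by_cases h : l = gid
      · subst h
        simpa [List.filter_map, Function.comp_def] using hrest
      · simpa [List.filter_map, Function.comp_def, h] using hrest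

-- B's dict built by the grouping fold looks up to the filter of the processed pairs
theorem pvGroups_fold_getD (l : List (String × Int)) (d : PySem.Dict Int (List String)) (gid : Int) :
    (l.foldl (fun d p => if decide (0 ≤ p.2) then d.insert p.2 (d.getD p.2 [] ++ [p.1]) else d) d).getD gid []
      = d.getD gid [] ++ (l.filter (fun p => decide (0 ≤ p.2) && (p.2 == gid))).map Prod.fst := by
  induction l generalizing d with
  | nil => simp
  | cons p rest ih =>
    obtain ⟨tok, lid⟩ := p
    by_cases hs : (0:Int) ≤ lid
    · by_cases he : lid = gid
      · subst he
        simp only [List.foldl_cons, List.filter_cons, hs, decide_true, beq_self_eq_true,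
          Bool.and_true, if_true, List.map_cons]
        rw [ih, PySem.Dict.getD_insert_self]
        simp
      · have hne : gid ≠ lid := fun h => he h.symm
        simp only [List.foldl_cons, List.filter_cons, hs, decide_true, if_true]
        rw [ih, PySem.Dict.getD_insert_of_ne _ _ _ hne]
        simp [he]
    · simp only [List.foldl_cons, List.filter_cons, hs, decide_false, Bool.false_and]
      exact ih d

-- for a nonnegative gid the two per-line token lists coincide
theorem perLine_eq (tokens : List String) (line_ids : List Int) (gid : Int) (hg : 0 ≤ gid) :
    (pvGroupsB tokens line_ids).getD gid [] = pvCollectA tokens line_ids gid := by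
  rw [pvCollectA_eq_zip_filter]
  unfold pvGroupsB
  rw [pvGroups_fold_getD]
  have : ((tokens.zip line_ids).filter (fun p => decide (0 ≤ p.2) && (p.2 == gid)))
       = ((tokens.zip line_ids).filter (fun p => p.2 == gid)) := by
    apply List.filter_congr
    intro p _
    by_cases he : p.2 = gid
    · simp [he, hg]
    · simp [he]
  rw [this]
  simp

theorem join_empty_if (lt : List String) :
    (if lt = [] then "" else PySem.Str.join " " lt) = PySem.Str.join " " lt := by
  cases lt with
  | nil => rfl
  | cons h t => simp

-- ===== VERDICT (by name: the statement is the Claim_ definition above) =====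
theorem extract_line_texts_spec : Claim_equal_extract_line_texts := by
  intro tokens line_ids m _
  unfold Spec_extract_line_texts extract_line_texts extract_line_texts_alt
  simp only []
  set valid := line_ids.filter (fun lid => decide (0 ≤ lid)) with hvalid
  have hvpos : ∀ x ∈ valid, (0:Int) ≤ x := by
    intro x hx
    rw [hvalid] at hx
    have := List.of_mem_filter hx
    simpa using this
  by_cases hv : valid = []
  · simp [hv]
  · have hlen : ¬ valid.length = 0 := by simp [hv]
    simp only [hv, hlen, if_false]
    have key : ∀ (order : List Int), (∀ g ∈ order, (0:Int) ≤ g) →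
        order.foldl (fun acc gid =>
          let lt := pvCollectA tokens line_ids gid
          acc ++ [if lt = [] then "" else PySem.Str.join " " lt]) []
        = order.map (fun gid => PySem.Str.join " " ((pvGroupsB tokens line_ids).getD gid [])) := by
      intro order hord
      rw [PySem.List.foldl_append_singleton_eq_map]
      simp only [List.nil_append]
      apply List.map_congr_left
      intro g hg
      rw [join_empty_if, perLine_eq tokens line_ids g (hord g hg)]
    cases m with
    | none =>
      apply key
      intro g hg
      have := (PySem.List.mem_pyRange_one).mp hg
      exact this.1
    | some mp =>
      apply key
      intro g hg
      have hg' : g ∈ PySem.Set.ofList valid := (PySem.List.mem_sorted _ _ _ _).mp hg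
      have : g ∈ valid := (PySem.Set.mem_ofList _ _).mp hg'
      exact hvpos g this
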